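-- pv_equiv track=rewrite | github.com/LocalNewsImpact/MizzouNewsCrawler | src/utils/telemetry_extractor.py | _is_paywall
-- ===== SOURCE A (Python) =====
-- def _is_paywall(html: str) -> bool:
--     """Check if content appears to be behind a paywall."""
--     paywall_indicators = [
--         "subscribe to continue",
--         "paywall",
--         "premium content",
--         "sign up to read",
--         "subscribe for full access",
--         "login to continue",
--         "this article is for subscribers",
--     ]
--
--     text = html.lower()
--     return any(indicator in text for indicator in paywall_indicators)
-- ===== SOURCE B (Python) =====
-- _BY_FIRST = {
--     "s": ("subscribe to continue", "sign up to read", "subscribe for full access"),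
--     "p": ("paywall", "premium content"),
--     "l": ("login to continue",),
--     "t": ("this article is for subscribers",),
-- }
--
--
-- def _is_paywall(html: str) -> bool:
--     text = html.lower()
--     for i, c in enumerate(text):
--         for indicator in _BY_FIRST.get(c, ()):
--             if text.startswith(indicator, i):
--                 return True
--     return False
-- ===== Notes on version B (the rewrite author's own statement) =====
-- stated objective: alternative
-- what changed: Replaces A's seven independent any-membership substring scans with one left-to-right pass over the lowered text that, at each position, tries only the indicators grouped by their first character in a precomputed dict.
import Mathlib
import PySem

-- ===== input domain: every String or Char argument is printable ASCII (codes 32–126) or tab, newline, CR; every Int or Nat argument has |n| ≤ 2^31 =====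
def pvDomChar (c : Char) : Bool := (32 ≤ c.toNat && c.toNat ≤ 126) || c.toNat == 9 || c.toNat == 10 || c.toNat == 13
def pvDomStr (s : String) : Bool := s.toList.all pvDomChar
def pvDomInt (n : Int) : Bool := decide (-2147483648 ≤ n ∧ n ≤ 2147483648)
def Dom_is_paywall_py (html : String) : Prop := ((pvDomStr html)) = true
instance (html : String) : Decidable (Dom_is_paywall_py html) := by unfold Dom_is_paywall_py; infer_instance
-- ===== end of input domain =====

-- B replaces A's seven independent substring scans by a single left-to-right pass that
-- dispatches on the current character's first-letter group (objective: alternative).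

-- ===== PORT A =====
def pvIndicators : List String :=
  [ "subscribe to continue"
  , "paywall"
  , "premium content"
  , "sign up to read"
  , "subscribe for full access"
  , "login to continue"
  , "this article is for subscribers" ]

def is_paywall_py (html : String) : Bool :=
  let text := PySem.Str.lower html
  pvIndicators.any (fun indicator => PySem.Str.isIn indicator text)

-- ===== PORT B =====
-- the constant dict _BY_FIRST of Source B, as a function from the first character
def pvByFirst (c : Char) : List (List Char) :=
  if c = 's' then
    ["subscribe to continue".toList, "sign up to read".toList, "subscribe for full access".toList]
  else if c = 'p' then
    ["paywall".toList, "premium content".toList]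
  else if c = 'l' then
    ["login to continue".toList]
  else if c = 't' then
    ["this article is for subscribers".toList]
  else []

-- Source B's single pass: at each position, try only the indicators starting with that character
def pvScan : List Char → Bool
  | [] => false
  | c :: t => (pvByFirst c).any (fun p => p.isPrefixOf (c :: t)) || pvScan t

def is_paywall_py_alt (html : String) : Bool :=
  pvScan (PySem.Str.lower html).toList

-- ===== PRECONDITION & SPEC =====
def Spec_is_paywall_py (html : String) (out : Bool) : Prop := out = is_paywall_py_alt html
instance (html : String) (out : Bool) : Decidable (Spec_is_paywall_py html out) := by unfold Spec_is_paywall_py; infer_instance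

-- ===== CLAIM (what is proved, stated in full; the proofs are below) =====
def Claim_equal_is_paywall_py : Prop := ∀ (html : String), Dom_is_paywall_py html → Spec_is_paywall_py html (is_paywall_py html)

-- ===== LEMMAS AND PROOFS =====

lemma pvTL_sub_cont : "subscribe to continue".toList = ['s', 'u', 'b', 's', 'c', 'r', 'i', 'b', 'e', ' ', 't', 'o', ' ', 'c', 'o', 'n', 't', 'i', 'n', 'u', 'e'] := by decide
lemma pvTL_paywall : "paywall".toList = ['p', 'a', 'y', 'w', 'a', 'l', 'l'] := by decide
lemma pvTL_premium : "premium content".toList = ['p', 'r', 'e', 'm', 'i', 'u', 'm', ' ', 'c', 'o', 'n', 't', 'e', 'n', 't'] := by decide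
lemma pvTL_signup : "sign up to read".toList = ['s', 'i', 'g', 'n', ' ', 'u', 'p', ' ', 't', 'o', ' ', 'r', 'e', 'a', 'd'] := by decide
lemma pvTL_sub_full : "subscribe for full access".toList = ['s', 'u', 'b', 's', 'c', 'r', 'i', 'b', 'e', ' ', 'f', 'o', 'r', ' ', 'f', 'u', 'l', 'l', ' ', 'a', 'c', 'c', 'e', 's', 's'] := by decide
lemma pvTL_login : "login to continue".toList = ['l', 'o', 'g', 'i', 'n', ' ', 't', 'o', ' ', 'c', 'o', 'n', 't', 'i', 'n', 'u', 'e'] := by decide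
lemma pvTL_article : "this article is for subscribers".toList = ['t', 'h', 'i', 's', ' ', 'a', 'r', 't', 'i', 'c', 'l', 'e', ' ', 'i', 's', ' ', 'f', 'o', 'r', ' ', 's', 'u', 'b', 's', 'c', 'r', 'i', 'b', 'e', 'r', 's'] := by decide

-- the first-character dispatch is complete: trying only pvByFirst c at a position
-- starting with c finds exactly the indicators that are a prefix there
lemma pvDispatch (c : Char) (t : List Char) :
    (pvByFirst c).any (fun p => p.isPrefixOf (c :: t)) = true ↔
      ∃ s ∈ pvIndicators, s.toList <+: (c :: t) := by
  simp only [pvByFirst, pvIndicators, pvTL_sub_cont, pvTL_paywall, pvTL_premium, pvTL_signup,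
    pvTL_sub_full, pvTL_login, pvTL_article]
  by_cases h1 : c = 's' <;> by_cases h2 : c = 'p' <;> by_cases h3 : c = 'l' <;>
    by_cases h4 : c = 't' <;>
    simp_all [List.any_cons, List.isPrefixOf_iff_prefix, List.cons_prefix_cons] <;>
    tauto

lemma pvScan_iff (cs : List Char) :
    pvScan cs = true ↔ ∃ s ∈ pvIndicators, s.toList <:+: cs := by
  induction cs with
  | nil =>
    simp only [pvScan, pvIndicators]
    simp [List.infix_nil]
  | cons c t ih =>
    simp only [pvScan, Bool.or_eq_true, ih, pvDispatch]
    constructor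
    · rintro (⟨s, hs, hp⟩ | ⟨s, hs, hi⟩)
      · exact ⟨s, hs, List.infix_cons_iff.mpr (Or.inl hp)⟩
      · exact ⟨s, hs, List.infix_cons_iff.mpr (Or.inr hi)⟩
    · rintro ⟨s, hs, hi⟩
      rcases List.infix_cons_iff.mp hi with hp | hi'
      · exact Or.inl ⟨s, hs, hp⟩
      · exact Or.inr ⟨s, hs, hi'⟩

-- ===== VERDICT (by name: the statement is the Claim_ definition above) =====
theorem is_paywall_py_spec : Claim_equal_is_paywall_py := by
  intro html _
  unfold Spec_is_paywall_py is_paywall_py is_paywall_py_alt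
  rw [Bool.eq_iff_iff, pvScan_iff]
  simp [List.any_eq_true, PySem.Chars.isIn_iff_infix]
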